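-- pv_equiv track=rewrite | github.com/KamenHH/Solututions-Programming-101-HackBulgaria-2019 | Week2/Day3/matrix_bombing_plan.py | drop_bomb
-- ===== SOURCE A (Python) =====
-- def drop_bomb(m, r, c, curr_item):
--     from copy import deepcopy
--     temp_m = deepcopy(m)
--     damage_sum = 0
--     positions = {
--         'left': (0, -1),
--         'right': (0, 1),
--         'top': (-1, 0),
--         'bottom': (1, 0),
--         'topleft': (-1, -1),
--         'topright': (-1, 1),
--         'bottomleft': (1, -1),
--         'bottomright': (1, 1)
--     }
--     for pos in positions:
--         row = r + positions[pos][0]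
--         col = c + positions[pos][1]
--         if row >= 0 and col >= 0:
--             try:
--                 temp_m[row][col] = temp_m[row][col] - curr_item if temp_m[row][col] - curr_item >= 0 else 0
--             except IndexError:
--                 continue
--     return sum([sum(row) for row in temp_m])
-- ===== SOURCE B (Python) =====
-- def drop_bomb(m, r, c, curr_item):
--     total = sum(sum(row) for row in m)
--     for dr, dc in ((0, -1), (0, 1), (-1, 0), (1, 0),
--                    (-1, -1), (-1, 1), (1, -1), (1, 1)):
--         rr, cc = r + dr, c + dc
--         if 0 <= rr < len(m) and 0 <= cc < len(m[rr]):
--             val = m[rr][cc]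
--             new = val - curr_item if val - curr_item >= 0 else 0
--             total -= val - new
--     return total
-- ===== Notes on version B (the rewrite author's own statement) =====
-- stated objective: faster
-- what changed: B never copies or mutates the matrix: it computes the total sum once and subtracts each in-bounds neighbour's damage directly, instead of deepcopying the matrix, mutating eight cells and re-summing every row.
import Mathlib
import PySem

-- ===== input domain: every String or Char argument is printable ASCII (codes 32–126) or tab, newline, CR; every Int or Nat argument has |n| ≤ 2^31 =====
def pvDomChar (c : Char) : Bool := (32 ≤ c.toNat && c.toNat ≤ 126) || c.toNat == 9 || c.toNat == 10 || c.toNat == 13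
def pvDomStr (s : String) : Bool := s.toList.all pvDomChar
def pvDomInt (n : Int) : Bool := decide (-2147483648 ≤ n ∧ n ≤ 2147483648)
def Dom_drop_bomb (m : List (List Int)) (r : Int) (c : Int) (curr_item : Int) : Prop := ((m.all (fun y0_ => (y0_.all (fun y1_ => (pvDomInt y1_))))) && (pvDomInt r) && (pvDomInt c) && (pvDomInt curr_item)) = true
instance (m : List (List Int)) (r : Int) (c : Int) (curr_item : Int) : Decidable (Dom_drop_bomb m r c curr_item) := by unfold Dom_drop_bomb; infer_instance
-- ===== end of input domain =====

-- B never copies or mutates the matrix: it computes the total once and subtracts each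
-- in-bounds neighbour's damage, instead of deepcopy + eight in-place updates + re-summing.

-- ===== PORT A =====
-- the body of A's loop: if row ≥ 0 and col ≥ 0, try to clamp-update cell (row,col);
-- pyGet? = none is exactly Python's IndexError (`continue`)
def pvUpd (tm : List (List Int)) (row col ci : Int) : List (List Int) :=
  if row ≥ 0 ∧ col ≥ 0 then
    match PySem.List.pyGet? tm row with
    | none => tm
    | some rw =>
      match PySem.List.pyGet? rw col with
      | none => tm
      | some v =>
        tm.set row.toNat (rw.set col.toNat (if v - ci ≥ 0 then v - ci else 0))
  else tm

-- dict iteration order = insertion order of `positions`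
def pvOffsets : List (Int × Int) :=
  [(0, -1), (0, 1), (-1, 0), (1, 0), (-1, -1), (-1, 1), (1, -1), (1, 1)]

def drop_bomb (m : List (List Int)) (r : Int) (c : Int) (curr_item : Int) : Int :=
  let temp_m := pvOffsets.foldl (fun tm p => pvUpd tm (r + p.1) (c + p.2) curr_item) m
  (temp_m.map (fun row => row.sum)).sum

-- ===== PORT B =====
-- damage actually dealt at neighbour (rr,cc), 0 when out of bounds
def pvDamage (m : List (List Int)) (rr cc ci : Int) : Int :=
  if 0 ≤ rr ∧ rr < (m.length : Int) then
    let rw := m.getD rr.toNat []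
    if 0 ≤ cc ∧ cc < (rw.length : Int) then
      let v := rw.getD cc.toNat 0
      v - (if v - ci ≥ 0 then v - ci else 0)
    else 0
  else 0

def drop_bomb_alt (m : List (List Int)) (r : Int) (c : Int) (curr_item : Int) : Int :=
  pvOffsets.foldl (fun total p => total - pvDamage m (r + p.1) (c + p.2) curr_item)
    ((m.map (fun row => row.sum)).sum)

-- ===== PRECONDITION & SPEC =====
def Spec_drop_bomb (m : List (List Int)) (r : Int) (c : Int) (curr_item : Int) (out : Int) : Prop := out = drop_bomb_alt m r c curr_item
instance (m : List (List Int)) (r : Int) (c : Int) (curr_item : Int) (out : Int) : Decidable (Spec_drop_bomb m r c curr_item out) := by unfold Spec_drop_bomb; infer_instance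

-- ===== CLAIM (what is proved, stated in full; the proofs are below) =====
def Claim_equal_drop_bomb : Prop := ∀ (m : List (List Int)) (r : Int) (c : Int) (curr_item : Int), Dom_drop_bomb m r c curr_item → Spec_drop_bomb m r c curr_item (drop_bomb m r c curr_item)

-- ===== LEMMAS AND PROOFS =====

def pvSumM (tm : List (List Int)) : Int := (tm.map (fun row => row.sum)).sum

theorem pvSumSet (l : List Int) (n : Nat) (a : Int) (h : n < l.length) :
    (l.set n a).sum = l.sum - l[n] + a := by
  rw [List.sum_set, if_pos h]
  conv_rhs => rw [← List.sum_take_add_sum_drop l n, List.drop_eq_getElem_cons h]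
  simp only [List.sum_cons]; ring

theorem pvGetD_eq (tm : List (List Int)) (k : Nat) (h : k < tm.length) :
    tm.getD k [] = tm[k] := by
  rw [List.getD_eq_getElem?_getD, List.getElem?_eq_getElem h]; rfl

theorem pvGetD_eq' (l : List Int) (k : Nat) (h : k < l.length) :
    l.getD k 0 = l[k] := by
  rw [List.getD_eq_getElem?_getD, List.getElem?_eq_getElem h]; rfl

-- updating one cell changes the total by exactly the damage at that cell
theorem pvSumM_upd (tm : List (List Int)) (rr cc ci : Int) :
    pvSumM (pvUpd tm rr cc ci) = pvSumM tm - pvDamage tm rr cc ci := by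
  unfold pvUpd pvDamage
  by_cases hrc : rr ≥ 0 ∧ cc ≥ 0
  · obtain ⟨hr, hc⟩ := hrc
    rw [if_pos ⟨hr, hc⟩]
    by_cases hrl : rr < (tm.length : Int)
    · have hrn : rr.toNat < tm.length := by omega
      rw [PySem.List.pyGet?_eq_some_getElem tm hr hrl]
      simp only []
      by_cases hcl : cc < (tm[rr.toNat].length : Int)
      · have hcn : cc.toNat < tm[rr.toNat].length := by omega
        rw [PySem.List.pyGet?_eq_some_getElem _ hc hcl]
        simp only []
        simp only [pvGetD_eq tm rr.toNat hrn, pvGetD_eq' _ _ hcn]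
        rw [if_pos (show (0:Int) ≤ rr ∧ rr < (tm.length : Int) from ⟨hr, hrl⟩),
          if_pos (show (0:Int) ≤ cc ∧ cc < (tm[rr.toNat].length : Int) from ⟨hc, hcl⟩)]
        unfold pvSumM
        rw [List.map_set, pvSumSet _ _ _ (by simpa using hrn), List.getElem_map,
          pvSumSet _ _ _ hcn]
        ring
      · rw [(PySem.List.pyGet?_eq_none_iff _ _).mpr
          (by simp [PySem.Raise.InRange]; omega)]
        rw [if_pos (show (0:Int) ≤ rr ∧ rr < (tm.length : Int) from ⟨hr, hrl⟩)]
        simp only [pvGetD_eq tm rr.toNat hrn]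
        rw [if_neg (by omega)]
        ring
    · rw [(PySem.List.pyGet?_eq_none_iff _ _).mpr
        (by simp [PySem.Raise.InRange]; omega)]
      rw [if_neg (by omega)]
      ring
  · rw [if_neg hrc]
    rcases not_and_or.mp hrc with h | h
    · rw [if_neg (by omega)]; ring
    · by_cases hrl : 0 ≤ rr ∧ rr < (tm.length : Int)
      · rw [if_pos hrl, if_neg (by omega)]; ring
      · rw [if_neg hrl]; ring

-- updating cell (rr,cc) does not change the damage observed at a different cell (rr',cc')
theorem pvDamage_upd (tm : List (List Int)) (rr cc rr' cc' ci : Int)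
    (hne : (rr, cc) ≠ (rr', cc')) :
    pvDamage (pvUpd tm rr cc ci) rr' cc' ci = pvDamage tm rr' cc' ci := by
  unfold pvUpd
  by_cases hrc : rr ≥ 0 ∧ cc ≥ 0
  · rw [if_pos hrc]
    obtain ⟨hr, hc⟩ := hrc
    cases hget : PySem.List.pyGet? tm rr with
    | none => rfl
    | some rw0 =>
      simp only []
      cases hget2 : PySem.List.pyGet? rw0 cc with
      | none => rfl
      | some v =>
        simp only []
        rw [PySem.List.pyGet?_of_nonneg tm hr] at hget
        rw [PySem.List.pyGet?_of_nonneg rw0 hc] at hget2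
        obtain ⟨hrn, hrw0⟩ := List.getElem?_eq_some_iff.mp hget
        obtain ⟨hcn, hv⟩ := List.getElem?_eq_some_iff.mp hget2
        unfold pvDamage
        rw [List.length_set]
        by_cases h1 : 0 ≤ rr' ∧ rr' < (tm.length : Int)
        · rw [if_pos h1, if_pos h1]
          obtain ⟨hr', hrl'⟩ := h1
          have hrn' : rr'.toNat < tm.length := by omega
          by_cases heq : rr'.toNat = rr.toNat
          · have hrr : rr = rr' := by omega
            have hcc : cc ≠ cc' := by
              intro h; exact hne (by rw [hrr, h])
            have hrowset : (tm.set rr.toNat (rw0.set cc.toNat (if v - ci ≥ 0 then v - ci else 0))).getD rr'.toNat []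
                = rw0.set cc.toNat (if v - ci ≥ 0 then v - ci else 0) := by
              rw [List.getD_eq_getElem?_getD, heq, List.getElem?_set_self hrn]; rfl
            have hrow : tm.getD rr'.toNat [] = rw0 := by
              rw [List.getD_eq_getElem?_getD, heq, hget]; rfl
            simp only [hrowset, hrow, List.length_set]
            by_cases h2 : 0 ≤ cc' ∧ cc' < (rw0.length : Int)
            · rw [if_pos h2, if_pos h2]
              have : (rw0.set cc.toNat (if v - ci ≥ 0 then v - ci else 0)).getD cc'.toNat 0
                  = rw0.getD cc'.toNat 0 := by
                rw [List.getD_eq_getElem?_getD, List.getD_eq_getElem?_getD,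
                  List.getElem?_set_ne (by omega)]
              simp only [this]
            · rw [if_neg h2, if_neg h2]
          · have : (tm.set rr.toNat (rw0.set cc.toNat (if v - ci ≥ 0 then v - ci else 0))).getD rr'.toNat []
                = tm.getD rr'.toNat [] := by
              rw [List.getD_eq_getElem?_getD, List.getD_eq_getElem?_getD,
                List.getElem?_set_ne (by omega)]
            simp only [this]
        · rw [if_neg h1, if_neg h1]
  · rw [if_neg hrc]

theorem pvFold (L : List (Int × Int)) (r c ci : Int)
    (hL : L.Pairwise (fun p q => (r + p.1, c + p.2) ≠ (r + q.1, c + q.2))) :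
    ∀ tm : List (List Int),
      pvSumM (L.foldl (fun tm p => pvUpd tm (r + p.1) (c + p.2) ci) tm)
        = L.foldl (fun total p => total - pvDamage tm (r + p.1) (c + p.2) ci) (pvSumM tm) := by
  induction L with
  | nil => intro tm; rfl
  | cons p L ih =>
    intro tm
    rcases List.pairwise_cons.mp hL with ⟨hp, hL'⟩
    simp only [List.foldl_cons]
    rw [ih hL' (pvUpd tm (r + p.1) (c + p.2) ci), pvSumM_upd]
    exact PySem.List.foldl_congr_mem _ _ _ _
      (fun acc q hq => by rw [pvDamage_upd _ _ _ _ _ _ (hp q hq)])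

-- ===== VERDICT (by name: the statement is the Claim_ definition above) =====
theorem drop_bomb_spec : Claim_equal_drop_bomb := by
  intro m r c ci _
  show drop_bomb m r c ci = drop_bomb_alt m r c ci
  have hpw : pvOffsets.Pairwise (fun p q => (r + p.1, c + p.2) ≠ (r + q.1, c + q.2)) := by
    simp only [pvOffsets]
    norm_num [List.pairwise_cons, Prod.ext_iff]
    refine ⟨?_, ?_, ?_, ?_, ?_, ?_⟩ <;> (intro a b h h2; omega)
  have := pvFold pvOffsets r c ci hpw m
  simpa [drop_bomb, drop_bomb_alt, pvSumM] using this
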